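-- pv_equiv track=rewrite | github.com/pypi-data/pypi-mirror-371 | packages/enumeratiam/enumeratiam-0.0.4.tar.gz/enumeratiam-0.0.4/enumeratiam/getclient.py | client_initialize
-- ===== SOURCE A (Python) =====
-- def client_initialize(config_values, tokens_count):
--     session_state = {}
--     total_sum = sum(config_values)
--     product_acc = 1
--     for v in config_values:
--         product_acc *= (v + 1)
--
--     for idx in range(tokens_count):
--         token_value = (total_sum + product_acc + idx) % (idx + 1 if idx != 0 else 1)
--         session_state[f"token_{idx}"] = token_value
--
--     buffer_acc = 0
--     for step in range(50):
--         buffer_acc += step * 3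
--         session_state[f"buffer_{step}"] = (buffer_acc + total_sum) % (step + 5)
--
--     for filler in range(50):
--         computed_value = (filler ** 2 + product_acc) % (filler + 2)
--         session_state[f"filler_{filler}"] = computed_value
--
--     return session_state
-- ===== SOURCE B (Python) =====
-- def client_initialize(config_values, tokens_count):
--     # one fused pass over config_values for both aggregates
--     total_sum = 0
--     product_acc = 1
--     for v in config_values:
--         total_sum += v
--         product_acc *= v + 1
--     # per-section value formulas, simplified modularly:
--     #   token:  idx = -1 (mod idx+1)        -> (total_sum + product_acc - 1) % (idx + 1)
--     #   buffer: running accumulator 3*sum(0..i) has the closed form 3*i*(i+1)//2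
--     #   filler: i*i = 4 (mod i+2)           -> (product_acc + 4) % (i + 2)
--     sections = [
--         ("token", tokens_count, lambda i: (total_sum + product_acc - 1) % (i + 1)),
--         ("buffer", 50, lambda i: (3 * i * (i + 1) // 2 + total_sum) % (i + 5)),
--         ("filler", 50, lambda i: (product_acc + 4) % (i + 2)),
--     ]
--     return {f"{name}_{i}": value(i)
--             for name, count, value in sections
--             for i in range(count)}
-- ===== Notes on version B (the rewrite author's own statement) =====
-- stated objective: simpler
-- what changed: Replaces the three bespoke accumulator-threading insertion loops by one generic dict comprehension over a (name, count, formula) section table, with every entry computed independently: the buffer running accumulator becomes the closed form 3*i*(i+1)//2, and the token and filler formulas are simplified modularly to (total_sum+product_acc-1)%(i+1) and (product_acc+4)%(i+2); both config aggregates come from one fused pass.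
import Mathlib
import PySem

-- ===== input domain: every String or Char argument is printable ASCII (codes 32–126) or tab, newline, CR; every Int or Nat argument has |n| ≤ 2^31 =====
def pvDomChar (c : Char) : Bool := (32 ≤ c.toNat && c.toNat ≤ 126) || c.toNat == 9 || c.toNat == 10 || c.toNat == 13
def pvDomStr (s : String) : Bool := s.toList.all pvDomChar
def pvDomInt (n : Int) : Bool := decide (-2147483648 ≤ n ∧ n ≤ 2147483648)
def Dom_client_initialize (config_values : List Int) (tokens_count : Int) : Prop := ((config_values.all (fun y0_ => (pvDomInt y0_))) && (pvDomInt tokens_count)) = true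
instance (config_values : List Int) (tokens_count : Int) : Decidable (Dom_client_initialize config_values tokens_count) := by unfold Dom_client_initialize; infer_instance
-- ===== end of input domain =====

-- B replaces the three accumulator-threading insertion loops by one generic dict
-- comprehension over a (name, count, formula) section table, with every entry an
-- independent closed/modularly simplified formula and one fused pass over the config
-- (simpler decomposition; same cost).

-- ===== PORT A =====
def client_initialize (config_values : List Int) (tokens_count : Int) : List (String × Int) :=
  let total_sum := config_values.sum
  let product_acc := config_values.foldl (fun p v => p * (v + 1)) 1
  let d1 : PySem.Dict String Int :=
    (PySem.List.pyRange 0 tokens_count).foldl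
      (fun d idx =>
        d.insert ("token_" ++ PySem.Int.toStr idx)
          (PySem.Int.mod (total_sum + product_acc + idx) (if idx ≠ 0 then idx + 1 else 1)))
      PySem.Dict.empty
  let st2 : PySem.Dict String Int × Int :=
    (PySem.List.pyRange 0 50).foldl
      (fun p step =>
        (p.1.insert ("buffer_" ++ PySem.Int.toStr step)
            (PySem.Int.mod ((p.2 + step * 3) + total_sum) (step + 5)),
         p.2 + step * 3))
      (d1, 0)
  let d3 :=
    (PySem.List.pyRange 0 50).foldl
      (fun d filler =>
        d.insert ("filler_" ++ PySem.Int.toStr filler)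
          (PySem.Int.mod (filler ^ 2 + product_acc) (filler + 2)))
      st2.1
  d3.items

-- ===== PORT B =====
def client_initialize_alt (config_values : List Int) (tokens_count : Int) : List (String × Int) :=
  -- one fused pass over config_values for both aggregates
  let agg := config_values.foldl
    (fun (p : Int × Int) v => (p.1 + v, p.2 * (v + 1))) (0, 1)
  let total_sum := agg.1
  let product_acc := agg.2
  -- per-section value formulas, simplified modularly (see Source B)
  let sections : List (String × Int × (Int → Int)) :=
    [("token", tokens_count, fun i => PySem.Int.mod (total_sum + product_acc - 1) (i + 1)),
     ("buffer", 50, fun i =>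
        PySem.Int.mod (PySem.Int.floordiv (3 * i * (i + 1)) 2 + total_sum) (i + 5)),
     ("filler", 50, fun i => PySem.Int.mod (product_acc + 4) (i + 2))]
  (PySem.Dict.ofList
    (sections.flatMap (fun s =>
      (PySem.List.pyRange 0 s.2.1).map (fun i =>
        (s.1 ++ "_" ++ PySem.Int.toStr i, s.2.2 i))))).items

-- ===== PRECONDITION & SPEC =====
def Spec_client_initialize (config_values : List Int) (tokens_count : Int) (out : List (String × Int)) : Prop := out = client_initialize_alt config_values tokens_count
instance (config_values : List Int) (tokens_count : Int) (out : List (String × Int)) : Decidable (Spec_client_initialize config_values tokens_count out) := by unfold Spec_client_initialize; infer_instance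

-- ===== CLAIM (what is proved, stated in full; the proofs are below) =====
def Claim_equal_client_initialize : Prop := ∀ (config_values : List Int) (tokens_count : Int), Dom_client_initialize config_values tokens_count → Spec_client_initialize config_values tokens_count (client_initialize config_values tokens_count)

-- ===== LEMMAS AND PROOFS =====

-- str(n) is injective on the naturals: its decimal digits parse back to n.
theorem pvToDigitsCore_append (f n : Nat) (ds : List Char) :
    Nat.toDigitsCore 10 f n ds = Nat.toDigitsCore 10 f n [] ++ ds := by
  induction f generalizing n ds with
  | zero => simp [Nat.toDigitsCore]
  | succ f ih =>
    simp only [Nat.toDigitsCore]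
    by_cases h : n / 10 = 0
    · simp [h]
    · simp only [h]
      rw [ih (n/10) ((n % 10).digitChar :: ds), ih (n/10) [(n % 10).digitChar]]
      simp

theorem pvToDigitsCore_fuel (f g n : Nat) (hf : n < f) (hg : n < g) :
    Nat.toDigitsCore 10 f n [] = Nat.toDigitsCore 10 g n [] := by
  induction n using Nat.strong_induction_on generalizing f g with
  | _ n ih =>
  match f, g with
  | f+1, g+1 =>
    simp only [Nat.toDigitsCore]
    by_cases h : n / 10 = 0
    · simp [h]
    · simp only [h]
      rw [pvToDigitsCore_append f, pvToDigitsCore_append g]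
      have hlt : n / 10 < n := Nat.div_lt_self (by omega) (by omega)
      rw [ih (n/10) hlt f g (by omega) (by omega)]

theorem pvToDigits_lt (n : Nat) (h : n < 10) : Nat.toDigits 10 n = [Nat.digitChar n] := by
  unfold Nat.toDigits
  simp only [Nat.toDigitsCore]
  have : n / 10 = 0 := Nat.div_eq_of_lt h
  simp [this, Nat.mod_eq_of_lt h]

theorem pvToDigits_ge (n : Nat) (h : 10 ≤ n) :
    Nat.toDigits 10 n = Nat.toDigits 10 (n / 10) ++ [Nat.digitChar (n % 10)] := by
  unfold Nat.toDigits
  conv_lhs => simp only [Nat.toDigitsCore]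
  have h0 : ¬ (n / 10 = 0) := by omega
  simp only [h0]
  rw [pvToDigitsCore_append n]
  have hlt : n / 10 < n := Nat.div_lt_self (by omega) (by omega)
  rw [pvToDigitsCore_fuel n (n/10+1) (n/10) hlt (by omega)]
  simp

def pvParse (cs : List Char) : Nat := cs.foldl (fun a c => 10 * a + (c.toNat - 48)) 0

theorem pvParse_toDigits (n : Nat) : pvParse (Nat.toDigits 10 n) = n := by
  induction n using Nat.strong_induction_on with
  | _ n ih =>
  by_cases h : n < 10
  · rw [pvToDigits_lt n h]
    interval_cases n <;> decide
  · rw [pvToDigits_ge n (by omega)]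
    unfold pvParse
    rw [List.foldl_append]
    have hrec := ih (n/10) (Nat.div_lt_self (by omega) (by omega))
    unfold pvParse at hrec
    rw [hrec]
    simp only [List.foldl_cons, List.foldl_nil]
    have h10 : n % 10 < 10 := Nat.mod_lt _ (by omega)
    have : (Nat.digitChar (n % 10)).toNat - 48 = n % 10 := by
      interval_cases h' : n % 10 <;> simp_all <;> decide
    rw [this]
    omega

theorem pvToChars_inj {a b : Int} (ha : 0 ≤ a) (hb : 0 ≤ b)
    (hparse : ∀ n : Nat, (Nat.toDigits 10 n).foldl (fun a c => 10 * a + (c.toNat - 48)) 0 = n)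
    (h : PySem.Int.toChars a = PySem.Int.toChars b) : a = b := by
  unfold PySem.Int.toChars at h
  rw [if_neg (by omega), if_neg (by omega)] at h
  have := congrArg (List.foldl (fun a c => 10 * a + (c.toNat - 48)) 0) h
  rw [hparse, hparse] at this
  omega

theorem pvKey_inj (p : String) {a b : Int} (ha : 0 ≤ a) (hb : 0 ≤ b)
    (hparse : ∀ n : Nat, (Nat.toDigits 10 n).foldl (fun a c => 10 * a + (c.toNat - 48)) 0 = n)
    (h : p ++ PySem.Int.toStr a = p ++ PySem.Int.toStr b) : a = b := by
  have h2 := congrArg String.toList h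
  rw [String.toList_append, String.toList_append] at h2
  have h3 := List.append_cancel_left h2
  rw [PySem.Int.toList_toStr, PySem.Int.toList_toStr] at h3
  exact pvToChars_inj ha hb hparse h3

theorem pvKeyMap_nodup (p : String) (b : Int)
    (hparse : ∀ n : Nat, (Nat.toDigits 10 n).foldl (fun a c => 10 * a + (c.toNat - 48)) 0 = n) :
    ((PySem.List.pyRange 0 b).map (fun i => p ++ PySem.Int.toStr i)).Nodup := by
  apply List.Nodup.map_on
  · intro x hx y hy hxy
    rw [PySem.List.mem_pyRange_one] at hx hy
    exact pvKey_inj p hx.1 hy.1 hparse hxy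
  · rcases le_or_gt b 0 with hb | hb
    · have : PySem.List.pyRange 0 b = [] := by
        apply List.eq_nil_iff_forall_not_mem.mpr
        intro x hx; rw [PySem.List.mem_pyRange_one] at hx; omega
      simp [this]
    · obtain ⟨m, rfl⟩ : ∃ m : Nat, b = (m : Int) := ⟨b.toNat, by omega⟩
      rw [PySem.List.pyRange_zero_natCast]
      exact (List.nodup_range).map (fun x y h => by exact_mod_cast h)

def pvBufPairs (T : Int) : List Int → Int → List (String × Int)
  | [], _ => []
  | s :: rest, acc =>
      ("buffer_" ++ PySem.Int.toStr s, PySem.Int.mod ((acc + s * 3) + T) (s + 5))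
        :: pvBufPairs T rest (acc + s * 3)

theorem pvBuf_fold (T : Int) (l : List Int) (d : PySem.Dict String Int) (acc : Int)
    (fresh : ∀ a ∈ l, d.contains ("buffer_" ++ PySem.Int.toStr a) = false)
    (nodup : (l.map (fun i => ("buffer_" ++ PySem.Int.toStr i : String))).Nodup) :
    ((l.foldl
        (fun p step =>
          (p.1.insert ("buffer_" ++ PySem.Int.toStr step)
              (PySem.Int.mod ((p.2 + step * 3) + T) (step + 5)),
           p.2 + step * 3))
        (d, acc)).1).items = d.items ++ pvBufPairs T l acc := by
  induction l generalizing d acc with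
  | nil => simp [pvBufPairs]
  | cons s rest ih =>
    simp only [List.foldl_cons, pvBufPairs]
    rw [ih]
    · rw [PySem.Dict.items_insert_of_not_contains d _ (fresh s (by simp))]
      simp
    · intro a ha
      rw [PySem.Dict.contains_insert]
      have hne : ("buffer_" ++ PySem.Int.toStr a : String) ≠ "buffer_" ++ PySem.Int.toStr s := by
        simp only [List.map_cons, List.nodup_cons] at nodup
        intro h; exact nodup.1 (h ▸ List.mem_map_of_mem ha)
      simp [hne, fresh a (List.mem_cons_of_mem _ ha)]
    · simp only [List.map_cons, List.nodup_cons] at nodup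
      exact nodup.2

theorem pvBufPairs_closed (T : Int) (m : Nat) : ∀ (k : Nat) (acc : Int), k + m = 50 →
    2 * acc = 3 * ((k : Int) - 1) * k →
    pvBufPairs T (PySem.List.pyRange (k : Int) 50) acc
      = (PySem.List.pyRange (k : Int) 50).map (fun s =>
          (("buffer_" ++ PySem.Int.toStr s : String),
            PySem.Int.mod (PySem.Int.floordiv (3 * s * (s + 1)) 2 + T) (s + 5))) := by
  induction m with
  | zero =>
    intro k acc hk _
    have h50 : (k : Int) = 50 := by omega
    have : PySem.List.pyRange (k:Int) 50 = [] := by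
      apply List.eq_nil_iff_forall_not_mem.mpr
      intro x hx; rw [PySem.List.mem_pyRange_one] at hx; omega
    simp [this, pvBufPairs]
  | succ m ih =>
    intro k acc hk hacc
    have hlt : (k : Int) < 50 := by omega
    rw [PySem.List.pyRange_one_cons hlt]
    simp only [pvBufPairs, List.map_cons]
    have hdiv : acc + (k:Int) * 3 = PySem.Int.floordiv (3 * k * (k + 1)) 2 := by
      have h2 : (3 * (k:Int) * (k + 1)) = 2 * (acc + k * 3) := by ring_nf; ring_nf at hacc; omega
      rw [h2, PySem.Int.floordiv_eq_ediv_of_pos (by norm_num), Int.mul_ediv_cancel_left _ (by norm_num)]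
    congr 1
    · rw [hdiv]
    · have hcast : ((k:Int) + 1) = ((k+1 : Nat) : Int) := by push_cast; ring
      rw [hcast, ih (k+1) (acc + k*3) (by omega) (by push_cast; ring_nf; ring_nf at hacc; omega)]

theorem pvHparse : ∀ n : Nat, (Nat.toDigits 10 n).foldl (fun a c => 10 * a + (c.toNat - 48)) 0 = n := by
  intro n; have := pvParse_toDigits n; unfold pvParse at this; exact this

theorem pvTokFil_ne (i j : Int) :
    ("token_" ++ PySem.Int.toStr i : String) ≠ "filler_" ++ PySem.Int.toStr j := by
  intro h
  have h2 := congrArg String.toList h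
  rw [String.toList_append, String.toList_append] at h2
  have ht : "token_".toList = ['t','o','k','e','n','_'] := by decide
  have hb : "filler_".toList = ['f','i','l','l','e','r','_'] := by decide
  rw [ht, hb] at h2
  simp at h2

theorem pvBufFil_ne (i j : Int) :
    ("buffer_" ++ PySem.Int.toStr i : String) ≠ "filler_" ++ PySem.Int.toStr j := by
  intro h
  have h2 := congrArg String.toList h
  rw [String.toList_append, String.toList_append] at h2
  have ht : "buffer_".toList = ['b','u','f','f','e','r','_'] := by decide
  have hb : "filler_".toList = ['f','i','l','l','e','r','_'] := by decide
  rw [ht, hb] at h2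
  simp at h2

theorem pvBufPairs_keys (T : Int) (l : List Int) (acc : Int) :
    (pvBufPairs T l acc).map Prod.fst = l.map (fun i => ("buffer_" ++ PySem.Int.toStr i : String)) := by
  induction l generalizing acc with
  | nil => simp [pvBufPairs]
  | cons s rest ih => simp [pvBufPairs, ih]

theorem pvTokBuf_ne (i j : Int) :
    ("token_" ++ PySem.Int.toStr i : String) ≠ "buffer_" ++ PySem.Int.toStr j := by
  intro h
  have h2 := congrArg String.toList h
  rw [String.toList_append, String.toList_append] at h2
  have ht : "token_".toList = ['t','o','k','e','n','_'] := by decide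
  have hb : "buffer_".toList = ['b','u','f','f','e','r','_'] := by decide
  rw [ht, hb] at h2
  simp at h2

-- the fused pass of B computes exactly A's two aggregates
theorem pvFused (l : List Int) : ∀ (a b : Int),
    l.foldl (fun (p : Int × Int) v => (p.1 + v, p.2 * (v + 1))) (a, b)
      = (a + l.sum, l.foldl (fun p v => p * (v + 1)) b) := by
  induction l with
  | nil => intro a b; simp
  | cons x rest ih =>
    intro a b
    simp only [List.foldl_cons, List.sum_cons]
    rw [ih, add_assoc]

-- modular simplifications of the token and filler formulas
theorem pvTokVal (S i : Int) (hi : 0 ≤ i) :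
    PySem.Int.mod (S + i) (if i ≠ 0 then i + 1 else 1) = PySem.Int.mod (S - 1) (i + 1) := by
  by_cases h : i = 0
  · subst h; simp
  · rw [if_pos h, PySem.Int.mod_eq_emod_of_pos (by omega), PySem.Int.mod_eq_emod_of_pos (by omega)]
    have : S + i = (S - 1) + (i + 1) * 1 := by ring
    rw [this, Int.add_mul_emod_self_left]

theorem pvFilVal (P i : Int) (hi : 0 ≤ i) :
    PySem.Int.mod (i ^ 2 + P) (i + 2) = PySem.Int.mod (P + 4) (i + 2) := by
  rw [PySem.Int.mod_eq_emod_of_pos (by omega), PySem.Int.mod_eq_emod_of_pos (by omega)]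
  have : i ^ 2 + P = (P + 4) + (i + 2) * (i - 2) := by ring
  rw [this, Int.add_mul_emod_self_left]

theorem pvMainEq (cv : List Int) (tc : Int) :
    client_initialize cv tc = client_initialize_alt cv tc := by
  simp only [client_initialize, client_initialize_alt, pvFused cv 0 1, List.flatMap_cons,
    List.flatMap_nil, List.append_nil, zero_add]
  set T := cv.sum with hT
  set P := cv.foldl (fun p v => p * (v + 1)) 1 with hP
  -- abbreviations
  set tokA := (PySem.List.pyRange 0 tc).map (fun idx =>
      (("token_" ++ PySem.Int.toStr idx : String),
        PySem.Int.mod (T + P + idx) (if idx ≠ 0 then idx + 1 else 1))) with htokA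
  -- step 1: token dict items
  have h1 : ((PySem.List.pyRange 0 tc).foldl
      (fun d idx =>
        d.insert ("token_" ++ PySem.Int.toStr idx)
          (PySem.Int.mod (T + P + idx) (if idx ≠ 0 then idx + 1 else 1)))
      PySem.Dict.empty).items = tokA := by
    rw [PySem.Dict.items_foldl_insert_fresh _ (fun idx => "token_" ++ PySem.Int.toStr idx) _ _
        (fun a _ => PySem.Dict.contains_empty _) (pvKeyMap_nodup _ _ pvHparse)]
    simp [PySem.Dict.empty, htokA]
  set d1 := (PySem.List.pyRange 0 tc).foldl
      (fun d idx =>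
        d.insert ("token_" ++ PySem.Int.toStr idx)
          (PySem.Int.mod (T + P + idx) (if idx ≠ 0 then idx + 1 else 1)))
      PySem.Dict.empty with hd1
  -- freshness of buffer keys w.r.t. the token dict
  have hfreshBuf : ∀ a ∈ PySem.List.pyRange (0:Int) 50,
      d1.contains ("buffer_" ++ PySem.Int.toStr a) = false := by
    intro a _
    rw [PySem.Dict.contains_eq_decide_mem_keys]
    simp only [PySem.Dict.keys, h1, htokA, List.map_map, decide_eq_false_iff_not]
    simp only [List.mem_map, Function.comp]
    rintro ⟨i, -, hi⟩
    exact pvTokBuf_ne i a hi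
  -- step 2: buffer loop
  have h2 : ((PySem.List.pyRange (0:Int) 50).foldl
      (fun p step =>
        (p.1.insert ("buffer_" ++ PySem.Int.toStr step)
            (PySem.Int.mod ((p.2 + step * 3) + T) (step + 5)),
         p.2 + step * 3))
      (d1, 0)).1.items = tokA ++ pvBufPairs T (PySem.List.pyRange (0:Int) 50) 0 := by
    rw [pvBuf_fold T _ d1 0 hfreshBuf (pvKeyMap_nodup _ _ pvHparse), h1]
  set st2 := (PySem.List.pyRange (0:Int) 50).foldl
      (fun p step =>
        (p.1.insert ("buffer_" ++ PySem.Int.toStr step)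
            (PySem.Int.mod ((p.2 + step * 3) + T) (step + 5)),
         p.2 + step * 3))
      (d1, 0) with hst2
  -- freshness of filler keys w.r.t. token+buffer dict
  have hfreshFil : ∀ a ∈ PySem.List.pyRange (0:Int) 50,
      st2.1.contains ("filler_" ++ PySem.Int.toStr a) = false := by
    intro a _
    rw [PySem.Dict.contains_eq_decide_mem_keys]
    simp only [PySem.Dict.keys, h2, decide_eq_false_iff_not, List.map_append, List.mem_append]
    rw [pvBufPairs_keys]
    simp only [htokA, List.map_map, List.mem_map, Function.comp]
    rintro (⟨i, -, hi⟩ | ⟨i, -, hi⟩)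
    · exact pvTokFil_ne i a hi
    · exact pvBufFil_ne i a hi
  -- step 3: filler loop
  have h3 : ((PySem.List.pyRange (0:Int) 50).foldl
      (fun d filler =>
        d.insert ("filler_" ++ PySem.Int.toStr filler)
          (PySem.Int.mod (filler ^ 2 + P) (filler + 2)))
      st2.1).items
      = (tokA ++ pvBufPairs T (PySem.List.pyRange (0:Int) 50) 0)
        ++ (PySem.List.pyRange (0:Int) 50).map (fun filler =>
            (("filler_" ++ PySem.Int.toStr filler : String),
              PySem.Int.mod (filler ^ 2 + P) (filler + 2))) := by
    rw [PySem.Dict.items_foldl_insert_fresh _ (fun i => "filler_" ++ PySem.Int.toStr i) _ _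
        hfreshFil (pvKeyMap_nodup _ _ pvHparse), h2]
  rw [h3]
  -- normalize B's section keys to the literal prefixes
  have kt : ∀ i : Int, (("token" : String) ++ "_" ++ PySem.Int.toStr i)
      = "token_" ++ PySem.Int.toStr i := by
    intro i; rfl
  have kb : ∀ i : Int, (("buffer" : String) ++ "_" ++ PySem.Int.toStr i)
      = "buffer_" ++ PySem.Int.toStr i := by
    intro i; rfl
  have kf : ∀ i : Int, (("filler" : String) ++ "_" ++ PySem.Int.toStr i)
      = "filler_" ++ PySem.Int.toStr i := by
    intro i; rfl
  simp only [kt, kb, kf]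
  -- RHS: dict(pairs) keeps pairs in order because all keys are distinct
  set tokB := (PySem.List.pyRange 0 tc).map (fun idx =>
      (("token_" ++ PySem.Int.toStr idx : String),
        PySem.Int.mod (T + P - 1) (idx + 1))) with htokB
  set bufB := (PySem.List.pyRange (0:Int) 50).map (fun step =>
      (("buffer_" ++ PySem.Int.toStr step : String),
        PySem.Int.mod (PySem.Int.floordiv (3 * step * (step + 1)) 2 + T) (step + 5))) with hbufB
  set filB := (PySem.List.pyRange (0:Int) 50).map (fun filler =>
      (("filler_" ++ PySem.Int.toStr filler : String),
        PySem.Int.mod (P + 4) (filler + 2))) with hfilB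
  have hkeys : ((tokB ++ bufB ++ filB).map Prod.fst).Nodup := by
    simp only [htokB, hbufB, hfilB, List.map_append, List.map_map]
    have hc1 : (Prod.fst ∘ fun idx => (("token_" ++ PySem.Int.toStr idx : String),
        PySem.Int.mod (T + P - 1) (idx + 1))) = fun idx => ("token_" ++ PySem.Int.toStr idx : String) := rfl
    have hc2 : (Prod.fst ∘ fun step => (("buffer_" ++ PySem.Int.toStr step : String),
        PySem.Int.mod (PySem.Int.floordiv (3 * step * (step + 1)) 2 + T) (step + 5)))
        = fun step => ("buffer_" ++ PySem.Int.toStr step : String) := rfl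
    have hc3 : (Prod.fst ∘ fun filler => (("filler_" ++ PySem.Int.toStr filler : String),
        PySem.Int.mod (P + 4) (filler + 2)))
        = fun filler => ("filler_" ++ PySem.Int.toStr filler : String) := rfl
    rw [hc1, hc2, hc3]
    rw [List.nodup_append, List.nodup_append]
    refine ⟨⟨pvKeyMap_nodup _ _ pvHparse, pvKeyMap_nodup _ _ pvHparse, ?_⟩,
            pvKeyMap_nodup _ _ pvHparse, ?_⟩
    · intro x hx y hy
      simp only [List.mem_map] at hx hy
      obtain ⟨i, -, rfl⟩ := hx
      obtain ⟨j, -, rfl⟩ := hy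
      exact pvTokBuf_ne i j
    · intro x hx y hy
      simp only [List.mem_append, List.mem_map] at hx
      simp only [List.mem_map] at hy
      obtain ⟨j, -, rfl⟩ := hy
      rcases hx with ⟨i, -, rfl⟩ | ⟨i, -, rfl⟩
      · exact pvTokFil_ne i j
      · exact pvBufFil_ne i j
  have hRHS : (PySem.Dict.ofList (tokB ++ (bufB ++ filB))).items = tokB ++ (bufB ++ filB) := by
    show (List.foldl (fun acc p => acc.insert p.1 p.2) PySem.Dict.empty (tokB ++ (bufB ++ filB))).items
        = tokB ++ (bufB ++ filB)
    rw [PySem.Dict.items_foldl_insert_fresh _ Prod.fst Prod.snd _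
        (fun a _ => PySem.Dict.contains_empty _)
        (by rw [← List.append_assoc]; exact hkeys)]
    simp [PySem.Dict.empty]
  rw [hRHS]
  -- componentwise equalities
  have e1 : tokA = tokB := by
    rw [htokA, htokB]
    apply List.map_congr_left
    intro i hi
    rw [PySem.List.mem_pyRange_one] at hi
    exact congrArg _ (pvTokVal (T + P) i hi.1)
  have e2 : pvBufPairs T (PySem.List.pyRange (0:Int) 50) 0 = bufB := by
    have := pvBufPairs_closed T 50 0 0 rfl (by norm_num)
    simpa using this
  have e3 : (PySem.List.pyRange (0:Int) 50).map (fun filler =>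
      (("filler_" ++ PySem.Int.toStr filler : String),
        PySem.Int.mod (filler ^ 2 + P) (filler + 2))) = filB := by
    rw [hfilB]
    apply List.map_congr_left
    intro i hi
    rw [PySem.List.mem_pyRange_one] at hi
    exact congrArg _ (pvFilVal P i hi.1)
  rw [e1, e2, e3, List.append_assoc]

-- ===== VERDICT (by name: the statement is the Claim_ definition above) =====
theorem client_initialize_spec : Claim_equal_client_initialize := by
  intro config_values tokens_count _
  unfold Spec_client_initialize
  exact pvMainEq config_values tokens_count
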